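-- pv_equiv track=rewrite | github.com/kareemsasa/kctl | kctl.py | detect_new_changes
-- ===== SOURCE A (Python) =====
-- def detect_new_changes(
--     baseline_entries: dict[str, str],
--     current_entries: dict[str, str],
-- ) -> list[str]:
--     new_changed_files: list[str] = []
--     for path in sorted(current_entries):
--         baseline_status = baseline_entries.get(path)
--         current_status = current_entries[path]
--         if baseline_status is None or baseline_status != current_status:
--             new_changed_files.append(path)
--     return new_changed_files
-- ===== SOURCE B (Python) =====
-- def detect_new_changes(
--     baseline_entries: dict[str, str],
--     current_entries: dict[str, str],
-- ) -> list[str]: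
--     # Sort both item lists by path, then merge with two pointers:
--     # advance the baseline pointer past smaller paths; a current item with no
--     # exactly-equal baseline item at the pointer is new or changed.
--     base = sorted(baseline_entries.items(), key=lambda kv: kv[0])
--     cur = sorted(current_entries.items(), key=lambda kv: kv[0])
--     out: list[str] = []
--     i = 0
--     for path, status in cur:
--         while i < len(base) and base[i][0] < path:
--             i += 1
--         if i == len(base) or base[i] != (path, status):
--             out.append(path)
--     return out
-- ===== Notes on version B (the rewrite author's own statement) =====
-- stated objective: alternative
-- what changed: Replaces A's hash-lookup loop over sorted keys with a sort-then-merge: both item lists are sorted by path and walked with two pointers, emitting current items without an exactly-equal baseline match; no per-key dict lookup and no final sort of the diff.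
import Mathlib
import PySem

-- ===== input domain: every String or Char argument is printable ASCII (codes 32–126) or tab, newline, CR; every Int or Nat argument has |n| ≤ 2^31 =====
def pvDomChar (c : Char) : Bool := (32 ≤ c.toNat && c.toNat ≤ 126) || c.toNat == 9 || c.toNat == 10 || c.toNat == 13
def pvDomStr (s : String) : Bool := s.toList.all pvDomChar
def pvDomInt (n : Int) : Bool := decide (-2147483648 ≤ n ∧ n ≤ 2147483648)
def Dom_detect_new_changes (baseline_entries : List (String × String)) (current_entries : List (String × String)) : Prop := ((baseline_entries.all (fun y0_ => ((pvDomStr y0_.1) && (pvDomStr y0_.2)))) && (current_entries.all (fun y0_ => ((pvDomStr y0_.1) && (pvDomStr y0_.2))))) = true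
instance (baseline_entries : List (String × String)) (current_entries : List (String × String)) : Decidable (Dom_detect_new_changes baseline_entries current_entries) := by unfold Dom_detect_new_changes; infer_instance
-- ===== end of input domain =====

-- B replaces A's per-key hash-lookup loop by sorting both item lists by path and
-- merging them with two pointers (alternative decomposition; same asymptotic cost).

-- ===== PORT A =====
-- literal port: for path in sorted(current_entries): … .get(path) … [path] … append
def detect_new_changes (baseline_entries : List (String × String)) (current_entries : List (String × String)) : List String :=
  let bd := PySem.Dict.ofList baseline_entries
  let cd := PySem.Dict.ofList current_entries
  (PySem.List.sorted cd.keys (fun x => x) false).foldl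
    (fun new_changed_files path =>
      let baseline_status := bd.get? path
      match cd.get? path with
      | none => new_changed_files   -- current_entries[path] would raise KeyError; unreachable (path ∈ keys)
      | some current_status =>
        if baseline_status = none ∨ baseline_status ≠ some current_status then
          new_changed_files ++ [path]
        else new_changed_files) []

-- ===== PORT B =====
-- Source B's merge loop: the baseline pointer skipping smaller paths becomes dropping the
-- head of the baseline list; "i == len(base) or base[i] != (path, status)" is the
-- two remaining branches.
def dncMerge (base cur : List (String × String)) : List String :=
  match base, cur with
  | _, [] => []
  | [], (path, _) :: ct => path :: dncMerge [] ct
  | (bk, bv) :: bt, (path, status) :: ct =>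
    if bk < path then dncMerge bt ((path, status) :: ct)
    else if (bk, bv) = (path, status) then dncMerge ((bk, bv) :: bt) ct
    else path :: dncMerge ((bk, bv) :: bt) ct
termination_by base.length + cur.length

-- literal port of Source B: sort both item lists by path, merge with two pointers
def detect_new_changes_alt (baseline_entries : List (String × String)) (current_entries : List (String × String)) : List String :=
  let base := PySem.List.sorted (PySem.Dict.ofList baseline_entries).items (fun kv => kv.1) false
  let cur := PySem.List.sorted (PySem.Dict.ofList current_entries).items (fun kv => kv.1) false
  dncMerge base cur

-- ===== PRECONDITION & SPEC =====
def Spec_detect_new_changes (baseline_entries : List (String × String)) (current_entries : List (String × String)) (out : List String) : Prop := out = detect_new_changes_alt baseline_entries current_entries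
instance (baseline_entries : List (String × String)) (current_entries : List (String × String)) (out : List String) : Decidable (Spec_detect_new_changes baseline_entries current_entries out) := by unfold Spec_detect_new_changes; infer_instance

-- ===== CLAIM (what is proved, stated in full; the proofs are below) =====
def Claim_equal_detect_new_changes : Prop := ∀ (baseline_entries : List (String × String)) (current_entries : List (String × String)), Dom_detect_new_changes baseline_entries current_entries → Spec_detect_new_changes baseline_entries current_entries (detect_new_changes baseline_entries current_entries)

-- ===== LEMMAS AND PROOFS =====

-- A's loop body, on a path that is a key of cd, is the plain filter test
-- "bd.get? path ≠ cd.get? path".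
theorem detect_loop_eq_filter (bd cd : PySem.Dict String String) :
    (PySem.List.sorted cd.keys (fun x => x) false).foldl
      (fun new_changed_files path =>
        let baseline_status := bd.get? path
        match cd.get? path with
        | none => new_changed_files
        | some current_status =>
          if baseline_status = none ∨ baseline_status ≠ some current_status then
            new_changed_files ++ [path]
          else new_changed_files) [] =
    (PySem.List.sorted cd.keys (fun x => x) false).filter
      (fun path => decide (bd.get? path ≠ cd.get? path)) := by
  rw [PySem.List.foldl_congr_mem
      (g := fun acc path => if bd.get? path ≠ cd.get? path then acc ++ [path] else acc)]
  · exact PySem.List.foldl_append_ite_eq_filter _ _ _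
  · intro acc path hmem
    have hk : path ∈ cd.keys := (PySem.List.mem_sorted _ _ _ _).1 hmem
    have : cd.get? path ≠ none := by
      simp [PySem.Dict.get?_eq_none_iff_not_mem_keys, hk]
    rcases h : cd.get? path with _ | cs
    · exact absurd h this
    · rcases bd.get? path with _ | bs <;> simp

-- the merge of a strictly key-sorted baseline with a key-nondecreasing current list
-- yields the paths of exactly the current items absent from the baseline list
theorem dncMerge_eq_filter (base cur : List (String × String))
    (hb : base.Pairwise (fun x y => x.1 < y.1))
    (hc : cur.Pairwise (fun x y => x.1 ≤ y.1)) :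
    dncMerge base cur = (cur.filter (fun e => decide (e ∉ base))).map (fun kv => kv.1) := by
  induction base, cur using dncMerge.induct with
  | case1 base => simp [dncMerge]
  | case2 path s ct ih =>
    simp only [dncMerge, List.filter, List.not_mem_nil, not_false_eq_true, decide_true,
      List.map_cons]
    exact congrArg _ (ih (List.Pairwise.nil) hc.tail)
  | case3 bk bv bt path status ct hlt ih =>
    rw [dncMerge, if_pos hlt, ih hb.tail hc]
    congr 1
    apply List.filter_congr
    intro e he
    have hpe : path ≤ e.1 := by
      rcases he with _ | ⟨_, he⟩
      · exact le_refl _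
      · exact List.rel_of_pairwise_cons hc he
    have : e ≠ (bk, bv) := by
      intro h; rw [h] at hpe; exact absurd (lt_of_lt_of_le hlt hpe) (lt_irrefl _)
    simp [this]
  | case4 bk bv bt path status ct hnlt heq ih =>
    rw [dncMerge, if_neg hnlt, if_pos heq, ih hb hc.tail]
    have h0 : (decide (((path, status) : String × String) ∉ (bk, bv) :: bt)) = false := by
      have : ((path, status) : String × String) ∈ (bk, bv) :: bt := by
        rw [← heq]; exact List.mem_cons_self
      simp [this]
    rw [List.filter_cons, h0]
    simp
  | case5 bk bv bt path status ct hnlt hne ih =>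
    rw [dncMerge, if_neg hnlt, if_neg hne, ih hb hc.tail]
    have h1 : (decide (((path, status) : String × String) ∉ (bk, bv) :: bt)) = true := by
      simp only [decide_eq_true_eq]
      intro hm
      rcases List.mem_cons.1 hm with h | h
      · exact hne h.symm
      · exact hnlt (List.rel_of_pairwise_cons hb h)
    rw [List.filter_cons, h1]
    simp

-- strict < on keys from ≤ on keys plus nodup of the key list
theorem pairwise_key_lt_of_nodup (l : List (String × String))
    (hle : l.Pairwise (fun x y => x.1 ≤ y.1)) (hnd : (l.map (fun kv => kv.1)).Nodup) :
    l.Pairwise (fun x y => x.1 < y.1) := by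
  have hne : l.Pairwise (fun x y => x.1 ≠ y.1) := (List.pairwise_map).1 hnd
  exact (hle.and hne).imp (fun ⟨h1, h2⟩ => lt_of_le_of_ne h1 h2)

theorem detect_new_changes_eq (baseline_entries current_entries : List (String × String)) :
    detect_new_changes baseline_entries current_entries =
    detect_new_changes_alt baseline_entries current_entries := by
  unfold detect_new_changes detect_new_changes_alt
  set bd := PySem.Dict.ofList baseline_entries with hbd
  set cd := PySem.Dict.ofList current_entries with hcd
  have hbn : bd.keys.Nodup := by rw [hbd]; exact PySem.Dict.nodup_keys_ofList _
  have hcn : cd.keys.Nodup := by rw [hcd]; exact PySem.Dict.nodup_keys_ofList _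
  rw [detect_loop_eq_filter bd cd]
  set base := PySem.List.sorted bd.items (fun kv => kv.1) false with hbase
  set cur := PySem.List.sorted cd.items (fun kv => kv.1) false with hcur
  have hbperm : base.Perm bd.items := PySem.List.sorted_perm _ _ _
  have hcperm : cur.Perm cd.items := PySem.List.sorted_perm _ _ _
  have hbkeys : (base.map (fun kv => kv.1)).Perm bd.keys := hbperm.map _
  have hckeys : (cur.map (fun kv => kv.1)).Perm cd.keys := hcperm.map _
  have hble : base.Pairwise (fun x y => x.1 ≤ y.1) := PySem.List.sorted_pairwise _ _
  have hcle : cur.Pairwise (fun x y => x.1 ≤ y.1) := PySem.List.sorted_pairwise _ _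
  have hblt : base.Pairwise (fun x y => x.1 < y.1) :=
    pairwise_key_lt_of_nodup _ hble (hbkeys.nodup_iff.2 hbn)
  have hclt : cur.Pairwise (fun x y => x.1 < y.1) :=
    pairwise_key_lt_of_nodup _ hcle (hckeys.nodup_iff.2 hcn)
  rw [dncMerge_eq_filter base cur hblt hcle]
  -- rewrite B's membership test into A's get?-comparison test, pointwise on cur
  have hfc : cur.filter (fun e => decide (e ∉ base)) =
      cur.filter (fun e => decide (bd.get? e.1 ≠ cd.get? e.1)) := by
    apply List.filter_congr
    intro e he
    obtain ⟨k, v⟩ := e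
    have hci : (k, v) ∈ cd.items := hcperm.subset he
    have hc : cd.get? k = some v := PySem.Dict.get?_of_mem_items cd hci hcn
    have hbm : (k, v) ∈ base ↔ bd.get? k = some v := by
      rw [hbperm.mem_iff]
      exact (PySem.Dict.get?_eq_some_iff_mem_items bd k v hbn).symm
    simp only [hc, hbm]
  rw [hfc]
  -- push the filter through map fst, then identify the sorted key lists
  have hmf : (cur.filter (fun e => decide (bd.get? e.1 ≠ cd.get? e.1))).map (fun kv => kv.1) =
      (cur.map (fun kv => kv.1)).filter (fun path => decide (bd.get? path ≠ cd.get? path)) := by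
    rw [List.filter_map]
    rfl
  rw [hmf]
  have hkeys : PySem.List.sorted cd.keys (fun x => x) false = cur.map (fun kv => kv.1) := by
    apply PySem.List.sorted_eq_of_perm_of_pairwise_lt
    · exact hckeys
    · exact (List.pairwise_map).2 hclt
  rw [hkeys]

-- ===== VERDICT (by name: the statement is the Claim_ definition above) =====
theorem detect_new_changes_spec : Claim_equal_detect_new_changes := by
  intro b c _
  show _ = _
  exact detect_new_changes_eq b c
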